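-- pv_equiv track=rewrite | github.com/Minhggg/AI1903_pfp191_nguyenngocminh | Lab03_A/Lab03_a_Q3.py | arrange_characters
-- ===== SOURCE A (Python) =====
-- def arrange_characters(input_str):
--     lowercase = ''
--     uppercase = ''
--     for char in input_str:
--         if char.islower():
--             lowercase += char
--         else:
--             uppercase += char
--     return lowercase + uppercase
-- ===== SOURCE B (Python) =====
-- def arrange_characters(input_str):
--     # stable sort: lowercase chars (key False) first, everything else after, order preserved
--     return ''.join(sorted(input_str, key=lambda c: not c.islower()))
-- ===== Notes on version B (the rewrite author's own statement) =====
-- stated objective: idiomatic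
-- what changed: Replaces the explicit two-accumulator concatenation loop with a single stable sort keyed on whether the character is non-lowercase, relying on sort stability to preserve order within each group.
import Mathlib
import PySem

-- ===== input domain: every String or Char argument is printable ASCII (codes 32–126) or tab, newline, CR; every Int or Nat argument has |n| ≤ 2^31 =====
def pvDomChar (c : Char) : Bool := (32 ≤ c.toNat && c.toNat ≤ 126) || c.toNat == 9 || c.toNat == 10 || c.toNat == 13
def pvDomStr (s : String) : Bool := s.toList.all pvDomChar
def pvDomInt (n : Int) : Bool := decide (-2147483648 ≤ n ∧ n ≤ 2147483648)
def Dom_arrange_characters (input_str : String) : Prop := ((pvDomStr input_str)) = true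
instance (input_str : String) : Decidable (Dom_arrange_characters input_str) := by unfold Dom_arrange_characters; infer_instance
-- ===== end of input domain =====

-- B replaces A's explicit two-accumulator loop with a single stable sort keyed on
-- "not c.islower()" (idiomatic; same result by sort stability).

-- ===== PORT A =====
-- A: loop over the string, appending each char to 'lowercase' or 'uppercase', then concatenate.
def arrange_characters (input_str : String) : String :=
  let p := input_str.toList.foldl
    (fun (acc : List Char × List Char) c =>
      if PySem.Chars.islower c then (acc.1 ++ [c], acc.2) else (acc.1, acc.2 ++ [c]))
    ([], [])
  String.ofList (p.1 ++ p.2)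

-- ===== PORT B =====
-- B: ''.join(sorted(input_str, key=lambda c: not c.islower()))
def arrange_characters_alt (input_str : String) : String :=
  String.ofList (PySem.List.sorted input_str.toList (fun c => !PySem.Chars.islower c) false)

-- ===== PRECONDITION & SPEC =====
def Spec_arrange_characters (input_str : String) (out : String) : Prop := out = arrange_characters_alt input_str
instance (input_str : String) (out : String) : Decidable (Spec_arrange_characters input_str out) := by unfold Spec_arrange_characters; infer_instance

-- ===== CLAIM (what is proved, stated in full; the proofs are below) =====
def Claim_equal_arrange_characters : Prop := ∀ (input_str : String), Dom_arrange_characters input_str → Spec_arrange_characters input_str (arrange_characters input_str)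

-- ===== LEMMAS AND PROOFS =====

-- A's loop accumulates the two filters.
theorem arrange_foldl_filter (xs : List Char) (lo up : List Char) :
    xs.foldl
      (fun (acc : List Char × List Char) c =>
        if PySem.Chars.islower c then (acc.1 ++ [c], acc.2) else (acc.1, acc.2 ++ [c]))
      (lo, up)
    = (lo ++ xs.filter (fun c => PySem.Chars.islower c),
       up ++ xs.filter (fun c => !PySem.Chars.islower c)) := by
  induction xs generalizing lo up with
  | nil => simp
  | cons c t ih =>
    by_cases h : PySem.Chars.islower c = true <;>
      simp [h, ih]

-- insertBy appends at the end when 'before' never fires.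
theorem insertBy_append_of_forall_false {α : Type} (before : α → α → Bool) (x : α)
    (ys : List α) (h : ∀ y ∈ ys, before x y = false) :
    PySem.List.insertBy before x ys = ys ++ [x] := by
  induction ys with
  | nil => rfl
  | cons y t ih =>
    have hy : before x y = false := h y (by simp)
    simp [PySem.List.insertBy, hy, ih (fun z hz => h z (by simp [hz]))]

-- insertBy lands between the false-prefix and the first true element.
theorem insertBy_mid {α : Type} (before : α → α → Bool) (x : α)
    (lo : List α) (hi : List α)
    (hlo : ∀ y ∈ lo, before x y = false)
    (hhi : ∀ y ∈ hi, before x y = true) :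
    PySem.List.insertBy before x (lo ++ hi) =
      lo ++ x :: hi := by
  induction lo with
  | nil =>
    cases hi with
    | nil => rfl
    | cons y t => simp [PySem.List.insertBy, hhi y (by simp)]
  | cons z t ih =>
    have hz : before x z = false := hlo z (by simp)
    simp [PySem.List.insertBy, hz, ih (fun w hw => hlo w (by simp [hw]))]

-- the stable sort on a binary key is the stable partition
theorem sorted_binary_partition (xs : List Char) :
    PySem.List.sorted xs (fun c => !PySem.Chars.islower c) false =
      xs.filter (fun c => PySem.Chars.islower c) ++ xs.filter (fun c => !PySem.Chars.islower c) := by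
  rw [PySem.List.sorted_eq_foldl_insertBy]
  induction xs using List.reverseRecOn with
  | nil => rfl
  | append_singleton t x ih =>
    rw [List.foldl_append, List.foldl_cons, List.foldl_nil, ih]
    by_cases hx : PySem.Chars.islower x = true
    · rw [insertBy_mid _ x _ _
        (fun y hy => by
          have := List.of_mem_filter hy
          simp_all)
        (fun y hy => by
          have := List.of_mem_filter hy
          simp_all)]
      simp [List.filter_append, List.filter_cons, hx]
    · rw [insertBy_append_of_forall_false _ x _
        (fun y hy => by
          rcases List.mem_append.mp hy with h | h <;>
            have := List.of_mem_filter h <;> simp_all)]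
      simp [List.filter_append, List.filter_cons, hx]

-- ===== VERDICT (by name: the statement is the Claim_ definition above) =====
theorem arrange_characters_spec : Claim_equal_arrange_characters := by
  intro s _
  unfold Spec_arrange_characters arrange_characters arrange_characters_alt
  simp only [sorted_binary_partition, arrange_foldl_filter, List.nil_append]
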